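-- pv_equiv track=rewrite | github.com/gwokfun/hermes-agent | plugins/skill-approval/__init__.py | _extract_skill_metadata
-- ===== SOURCE A (Python) =====
-- def _extract_skill_metadata(tool_args: dict) -> tuple[str, str, str]:
--     """Extract skill name, description, and category from tool arguments.
--
--     Args:
--         tool_args: Arguments passed to skill_manage tool
--
--     Returns:
--         (skill_name, description, category)
--     """
--     skill_name = tool_args.get("name", "unnamed-skill")
--     category = tool_args.get("category", "")
--
--     # Try to extract description from content (SKILL.md frontmatter)
--     content = tool_args.get("content", "")
--     description = ""
--
--     if content:
--         # Simple frontmatter parsing - look for description: field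
--         lines = content.split('\n')
--         in_frontmatter = False
--         for line in lines:
--             if line.strip() == '---':
--                 if not in_frontmatter:
--                     in_frontmatter = True
--                     continue
--                 else:
--                     break
--             if in_frontmatter and line.strip().startswith('description:'):
--                 description = line.split(':', 1)[1].strip().strip('"\'')
--                 break
--
--     return skill_name, description, category
-- ===== SOURCE B (Python) =====
-- def _extract_skill_metadata(tool_args: dict) -> tuple[str, str, str]:
--     """Extract skill name, description, and category from tool arguments."""
--     skill_name = tool_args.get("name", "unnamed-skill")
--     category = tool_args.get("category", "")
--
--     lines = tool_args.get("content", "").split('\n')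
--     # positions of all frontmatter delimiter lines
--     markers = [i for i, line in enumerate(lines) if line.strip() == '---']
--     description = ""
--     if markers:
--         stop = markers[1] if len(markers) > 1 else len(lines)
--         for line in lines[markers[0] + 1 : stop]:
--             if line.strip().startswith('description:'):
--                 description = line.split(':', 1)[1].strip().strip('"\'')
--                 break
--
--     return skill_name, description, category
-- ===== Notes on version B (the rewrite author's own statement) =====
-- stated objective: alternative
-- what changed: Replaced the single in_frontmatter flag state machine with a decomposition that first collects the indices of all '---' delimiter lines, slices out the frontmatter block between the first and second one, and then scans only that block for the first description: line.
import Mathlib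
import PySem

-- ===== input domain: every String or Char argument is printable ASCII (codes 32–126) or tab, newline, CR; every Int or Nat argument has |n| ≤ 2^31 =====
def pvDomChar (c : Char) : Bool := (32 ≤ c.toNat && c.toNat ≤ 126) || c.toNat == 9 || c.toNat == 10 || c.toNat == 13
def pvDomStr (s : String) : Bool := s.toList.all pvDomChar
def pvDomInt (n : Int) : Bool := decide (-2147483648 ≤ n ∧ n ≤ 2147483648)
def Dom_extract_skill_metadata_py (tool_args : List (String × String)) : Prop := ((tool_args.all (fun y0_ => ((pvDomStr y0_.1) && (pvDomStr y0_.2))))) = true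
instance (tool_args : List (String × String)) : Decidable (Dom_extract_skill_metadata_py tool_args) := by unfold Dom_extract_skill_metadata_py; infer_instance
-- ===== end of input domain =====

-- B replaces A's in_frontmatter flag state machine by collecting all '---' line indices,
-- slicing the frontmatter block between the first and second, and scanning only that block (alternative decomposition, same cost).

-- tool_args.get(key, dflt), shared by both ports (the dict argument itself)
def pvGetArg (tool_args : List (String × String)) (key dflt : String) : String :=
  (PySem.Dict.mk tool_args).getD key dflt

-- line.split(':', 1)[1].strip().strip('"\'') — identical expression in both Pythons.
-- pyGetD with default "" is exact at every call site: the line's strip starts with "description:", so ':' occurs and index 1 exists.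
def pvDesc (line : String) : String :=
  PySem.Str.stripChars (PySem.Str.strip (PySem.List.pyGetD ((PySem.Str.splitMax? line ":" 1).getD []) 1 "")) "\"'"

-- ===== PORT A =====
-- the for-loop over lines with the in_frontmatter flag; returns the description (set just before each break)
def pvALoop : List String → Bool → String
  | [], _ => ""
  | line :: rest, inF =>
    if PySem.Str.strip line == "---" then
      if !inF then pvALoop rest true else ""
    else if inF && PySem.Str.startswith (PySem.Str.strip line) "description:" then
      pvDesc line
    else pvALoop rest inF

def extract_skill_metadata_py (tool_args : List (String × String)) : String × String × String :=
  let skill_name := pvGetArg tool_args "name" "unnamed-skill"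
  let category := pvGetArg tool_args "category" ""
  let content := pvGetArg tool_args "content" ""
  let description :=
    if content ≠ "" then
      pvALoop ((PySem.Str.split? content "\n").getD []) false  -- split? is some: "\n" ≠ ""
    else ""
  (skill_name, description, category)

-- ===== PORT B =====
-- the for-loop over the sliced block: first line whose strip starts with 'description:', else ""
def pvBScan : List String → String
  | [] => ""
  | line :: rest =>
    if PySem.Str.startswith (PySem.Str.strip line) "description:" then pvDesc line
    else pvBScan rest

-- the description computation of Source B: markers list, then slice, then scan
def pvBDesc (lines : List String) : String :=
  let markers := ((PySem.List.enumerate lines).filter (fun q => PySem.Str.strip q.2 == "---")).map Prod.fst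
  match markers with
  | [] => ""
  | i :: rest =>
    let stop : Int := match rest with | j :: _ => j | [] => (lines.length : Int)
    pvBScan (PySem.List.slice lines (some (i + 1)) (some stop))

def extract_skill_metadata_py_alt (tool_args : List (String × String)) : String × String × String :=
  let skill_name := pvGetArg tool_args "name" "unnamed-skill"
  let category := pvGetArg tool_args "category" ""
  let lines := (PySem.Str.split? (pvGetArg tool_args "content" "") "\n").getD []  -- split? is some: "\n" ≠ ""
  (skill_name, pvBDesc lines, category)

-- ===== PRECONDITION & SPEC =====
def Spec_extract_skill_metadata_py (tool_args : List (String × String)) (out : String × String × String) : Prop := out = extract_skill_metadata_py_alt tool_args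
instance (tool_args : List (String × String)) (out : String × String × String) : Decidable (Spec_extract_skill_metadata_py tool_args out) := by unfold Spec_extract_skill_metadata_py; infer_instance

-- ===== CLAIM (what is proved, stated in full; the proofs are below) =====
def Claim_equal_extract_skill_metadata_py : Prop := ∀ (tool_args : List (String × String)), Dom_extract_skill_metadata_py tool_args → Spec_extract_skill_metadata_py tool_args (extract_skill_metadata_py tool_args)

-- ===== LEMMAS AND PROOFS =====
-- the delimiter predicate
def pvP (l : String) : Bool := PySem.Str.strip l == "---"

-- marker indices of `t` starting at offset `k` (the enumerate/filter/map expression of pvBDesc, parametrised)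
def pvF (t : List String) (k : Int) : List Int :=
  ((PySem.List.enumerate t k).filter (fun q => PySem.Str.strip q.2 == "---")).map Prod.fst

theorem pvF_cons (l : String) (r : List String) (k : Int) :
    pvF (l :: r) k = if pvP l then k :: pvF r (k + 1) else pvF r (k + 1) := by
  simp only [pvF, pvP, PySem.List.enumerate, List.filter_cons]
  split_ifs with h <;> simp

theorem pvF_shift (t : List String) (k : Int) : pvF t (k + 1) = (pvF t k).map (· + 1) := by
  induction t generalizing k with
  | nil => rfl
  | cons l r ih =>
    rw [pvF_cons, pvF_cons]
    split_ifs with h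
    · simp [ih (k + 1)]
    · exact ih (k + 1)

theorem pvF_eq_nil_iff (t : List String) (k : Int) :
    pvF t k = [] ↔ ∀ l ∈ t, pvP l = false := by
  induction t generalizing k with
  | nil => simp [pvF]
  | cons l r ih =>
    rw [pvF_cons]
    split_ifs with h
    · simp [h]
    · simpa [h] using ih (k + 1)

theorem pvF_bounds (t : List String) (k : Int) : ∀ j ∈ pvF t k, k ≤ j ∧ j < k + t.length := by
  induction t generalizing k with
  | nil => simp [pvF]
  | cons l r ih =>
    intro j hj
    rw [pvF_cons] at hj
    have step : j ∈ pvF r (k + 1) → k ≤ j ∧ j < k + (l :: r).length := by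
      intro hmem
      have := ih (k + 1) j hmem
      simp only [List.length_cons]
      constructor <;> [omega; (push_cast; omega)]
    split_ifs at hj with h
    · cases List.mem_cons.mp hj with
      | inl h1 =>
        subst h1
        simp only [List.length_cons]
        constructor <;> [omega; (push_cast; omega)]
      | inr hmem => exact step hmem
    · exact step hj

theorem pvF_take (t : List String) (j : Int) (ms : List Int) (h : pvF t 0 = j :: ms) :
    t.take j.toNat = t.takeWhile (fun l => !pvP l) := by
  induction t generalizing j ms with
  | nil => simp [pvF] at h
  | cons l r ih =>
    rw [pvF_cons] at h
    split_ifs at h with hp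
    · obtain ⟨rfl, -⟩ := List.cons.inj h
      simp [hp]
    · rw [pvF_shift] at h
      cases hr : pvF r 0 with
      | nil => rw [hr] at h; simp at h
      | cons j0 ms0 =>
        rw [hr, List.map_cons] at h
        obtain ⟨rfl, -⟩ := List.cons.inj h
        have hj0 : 0 ≤ j0 := (pvF_bounds r 0 j0 (hr ▸ List.mem_cons_self ..)).1
        have hsucc : (j0 + 1).toNat = j0.toNat + 1 := by omega
        simp [hsucc, hp, ih j0 ms0 hr]

-- A's frontmatter scan equals B's flag-free scan of the block before the closing delimiter
theorem pvScan_eq (t : List String) : pvALoop t true = pvBScan (t.takeWhile (fun l => !pvP l)) := by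
  induction t with
  | nil => rfl
  | cons l r ih =>
    simp only [pvP] at ih ⊢
    by_cases hp : (PySem.Str.strip l == "---") = true
    · simp [pvALoop, hp, pvBScan]
    · simp [pvALoop, hp, pvBScan, ih]

-- the common normal form of both description computations
def pvSpecDesc (t : List String) : String :=
  if t.all (fun l => !pvP l) then ""
  else pvBScan (((t.dropWhile (fun l => !pvP l)).tail).takeWhile (fun l => !pvP l))

theorem pvSpec_cons_neg (l : String) (r : List String) (hp : pvP l = false) :
    pvSpecDesc (l :: r) = pvSpecDesc r := by
  simp [pvSpecDesc, hp]

theorem pvSpec_cons_pos (l : String) (r : List String) (hp : pvP l = true) :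
    pvSpecDesc (l :: r) = pvBScan (r.takeWhile (fun x => !pvP x)) := by
  simp [pvSpecDesc, hp]

theorem pvALoop_spec (t : List String) : pvALoop t false = pvSpecDesc t := by
  induction t with
  | nil => rfl
  | cons l r ih =>
    by_cases hp : pvP l = true
    · rw [pvSpec_cons_pos l r hp, ← pvScan_eq r]
      simp only [pvP] at hp
      simp [pvALoop, hp]
    · have hp' : pvP l = false := by simpa using hp
      rw [pvSpec_cons_neg l r hp', ← ih]
      simp only [pvP] at hp'
      simp [pvALoop, hp']

theorem pvSlice_eq_take_drop (t : List String) (a b : Int) (ha : 0 ≤ a) (ha' : a ≤ t.length)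
    (hb : 0 ≤ b) (hb' : b ≤ t.length) :
    PySem.List.slice t (some a) (some b) = (t.drop a.toNat).take (b.toNat - a.toNat) := by
  simp only [PySem.List.slice, PySem.List.clampIdx]
  rw [if_neg (by omega), if_neg (by omega)]
  have h1 : min a.toNat t.length = a.toNat := by omega
  have h2 : min b.toNat t.length = b.toNat := by omega
  rw [h1, h2]

theorem pvSlice_shift (l : String) (t : List String) (a b : Int) (ha : 0 ≤ a)
    (ha' : a ≤ t.length) (hb : 0 ≤ b) (hb' : b ≤ t.length) :
    PySem.List.slice (l :: t) (some (a + 1)) (some (b + 1)) = PySem.List.slice t (some a) (some b) := by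
  rw [pvSlice_eq_take_drop t a b ha ha' hb hb',
    pvSlice_eq_take_drop (l :: t) (a + 1) (b + 1) (by omega) (by simp only [List.length_cons]; push_cast; omega)
      (by omega) (by simp only [List.length_cons]; push_cast; omega)]
  have h1 : (a + 1).toNat = a.toNat + 1 := by omega
  have h2 : (b + 1).toNat = b.toNat + 1 := by omega
  rw [h1, h2, List.drop_succ_cons]
  congr 1
  omega

-- B ignores a leading non-delimiter line
theorem pvBDesc_cons_neg (l : String) (r : List String) (hp : pvP l = false) :
    pvBDesc (l :: r) = pvBDesc r := by
  have hB : ∀ (t : List String),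
      pvBDesc t = (match pvF t 0 with
        | [] => ""
        | i :: rest =>
          pvBScan (PySem.List.slice t (some (i + 1))
            (some (match rest with | j :: _ => j | [] => (t.length : Int))))) := fun t => rfl
  rw [hB, hB, pvF_cons, hp, if_neg (by simp), pvF_shift]
  cases hr : pvF r 0 with
  | nil => rfl
  | cons i rest =>
    have hi : 0 ≤ i ∧ i < 0 + r.length := pvF_bounds r 0 i (hr ▸ List.mem_cons_self ..)
    simp only [List.map_cons]
    cases rest with
    | nil =>
      simp only [List.map_nil, List.length_cons]
      rw [show (((r.length + 1 : Nat)) : Int) = (r.length : Int) + 1 by push_cast; ring]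
      exact congrArg pvBScan
        (pvSlice_shift l r (i + 1) (r.length : Int) (by omega) (by omega) (by positivity) (by simp))
    | cons j ms =>
      simp only [List.map_cons]
      have hj : 0 ≤ j ∧ j < 0 + r.length :=
        pvF_bounds r 0 j (hr ▸ List.mem_cons_of_mem _ (List.mem_cons_self ..))
      exact congrArg pvBScan
        (pvSlice_shift l r (i + 1) j (by omega) (by omega) (by omega) (by omega))

-- on a leading delimiter line B scans the block up to the next delimiter (or the end)
theorem pvBDesc_cons_pos (l : String) (r : List String) (hp : pvP l = true) :
    pvBDesc (l :: r) = pvBScan (r.takeWhile (fun x => !pvP x)) := by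
  have hB : ∀ (t : List String),
      pvBDesc t = (match pvF t 0 with
        | [] => ""
        | i :: rest =>
          pvBScan (PySem.List.slice t (some (i + 1))
            (some (match rest with | j :: _ => j | [] => (t.length : Int))))) := fun t => rfl
  rw [hB, pvF_cons, hp, if_pos rfl, pvF_shift]
  cases hr : pvF r 0 with
  | nil =>
    have hnone := (pvF_eq_nil_iff r 0).mp hr
    have hTW : r.takeWhile (fun x => !pvP x) = r :=
      List.takeWhile_eq_self_iff.mpr (by intro x hx; simp [hnone x hx])
    simp only [List.map_nil, List.length_cons]
    rw [pvSlice_eq_take_drop (l :: r) (0 + 1) ((r.length + 1 : Nat) : Int) (by omega)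
      (by simp only [List.length_cons]; push_cast; omega) (by positivity)
      (by simp only [List.length_cons]; omega)]
    simp [hTW, List.take_of_length_le]
  | cons j ms =>
    have hj : 0 ≤ j ∧ j < 0 + r.length := pvF_bounds r 0 j (hr ▸ List.mem_cons_self ..)
    simp only [List.map_cons]
    rw [pvSlice_eq_take_drop (l :: r) (0 + 1) (j + 1) (by omega)
      (by simp only [List.length_cons]; push_cast; omega) (by omega)
      (by simp only [List.length_cons]; push_cast; omega)]
    have htake : (j + 1).toNat - (0 + 1 : Int).toNat = j.toNat := by omega
    rw [htake]
    simp [pvF_take r j ms hr]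

theorem pvBDesc_spec (t : List String) : pvBDesc t = pvSpecDesc t := by
  induction t with
  | nil => rfl
  | cons l r ih =>
    by_cases hp : pvP l = true
    · rw [pvBDesc_cons_pos l r hp]
      simp [pvSpecDesc, hp]
    · have hp' : pvP l = false := by simpa using hp
      rw [pvBDesc_cons_neg l r hp', ih]
      simp [pvSpecDesc, hp']

-- A's whole description computation (including the `if content:` guard) equals B's
theorem pvDesc_eq (content : String) :
    (if content ≠ "" then pvALoop ((PySem.Str.split? content "\n").getD []) false else "") =
      pvBDesc ((PySem.Str.split? content "\n").getD []) := by
  by_cases h : content = ""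
  · subst h
    decide
  · rw [if_pos h, pvALoop_spec, pvBDesc_spec]

-- ===== VERDICT (by name: the statement is the Claim_ definition above) =====
theorem extract_skill_metadata_py_spec : Claim_equal_extract_skill_metadata_py := by
  intro tool_args _
  show extract_skill_metadata_py tool_args = extract_skill_metadata_py_alt tool_args
  simp only [extract_skill_metadata_py, extract_skill_metadata_py_alt]
  rw [pvDesc_eq]
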